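-- pv_equiv track=rewrite | github.com/ikko1250/coder_v1 | docs/build_ordinance_analysis_db.py | get_unescaped_pipe_positions
-- ===== SOURCE A (Python) =====
-- from typing import Dict, List, Optional, Sequence, Tuple
--
-- def get_unescaped_pipe_positions(text: str) -> List[int]:
--     positions: List[int] = []
--     escaped = False
--     for idx, ch in enumerate(text):
--         if escaped:
--             escaped = False
--             continue
--         if ch == "\\":
--             escaped = True
--             continue
--         if ch == "|":
--             positions.append(idx)
--     return positions
-- ===== SOURCE B (Python) =====
-- def get_unescaped_pipe_positions(text):
--     # Pass 1: runs[i] = length of the maximal backslash run ending just before index i.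
--     runs = []
--     run = 0
--     for ch in text:
--         runs.append(run)
--         run = run + 1 if ch == "\\" else 0
--     # Pass 2: a '|' is unescaped iff that run length is even (backslashes pair off).
--     return [i for i, ch in enumerate(text) if ch == "|" and runs[i] % 2 == 0]
-- ===== Notes on version B (the rewrite author's own statement) =====
-- stated objective: alternative
-- what changed: Replaces A's single stateful escape-flag scan with a two-stage algorithm: first build an array of backslash-run lengths, then select the pipe positions whose preceding run length is even (backslashes pair off), with no escape state tracked during selection.
import Mathlib
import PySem

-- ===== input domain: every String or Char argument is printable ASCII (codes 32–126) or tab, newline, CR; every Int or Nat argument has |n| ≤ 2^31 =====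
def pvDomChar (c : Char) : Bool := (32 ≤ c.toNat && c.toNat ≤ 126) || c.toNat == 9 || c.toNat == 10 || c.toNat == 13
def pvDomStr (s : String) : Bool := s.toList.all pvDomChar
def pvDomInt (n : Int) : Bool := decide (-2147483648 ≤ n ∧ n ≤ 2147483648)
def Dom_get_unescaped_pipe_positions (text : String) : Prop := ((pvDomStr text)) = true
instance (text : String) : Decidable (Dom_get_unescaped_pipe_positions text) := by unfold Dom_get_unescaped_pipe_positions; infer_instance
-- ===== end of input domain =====

-- B replaces A's stateful escape-flag scan by two staged passes: a backslash-run-length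
-- array, then selecting the '|' positions whose preceding run is even (objective: alternative).

-- ===== PORT A =====
-- state = (positions, escaped); one step per enumerated character, branches in A's order
def pvAStep (st : List Int × Bool) (p : Int × Char) : List Int × Bool :=
  if st.2 then (st.1, false)
  else if p.2 = '\\' then (st.1, true)
  else if p.2 = '|' then (st.1 ++ [p.1], false)
  else (st.1, false)

def get_unescaped_pipe_positions (text : String) : List Int :=
  ((PySem.List.enumerate text.toList 0).foldl pvAStep ([], false)).1

-- ===== PORT B =====
-- Pass 1: runs[i] = length of the maximal backslash run ending just before index i
def pvRuns : List Char → Nat → List Nat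
  | [], _ => []
  | c :: rest, run => run :: pvRuns rest (if c = '\\' then run + 1 else 0)

-- Pass 2: the comprehension "[i for i, ch in enumerate(text) if ch == '|' and runs[i] % 2 == 0]";
-- runs[i] is read by zipping enumerate(text) with runs, which are index-aligned by construction
def get_unescaped_pipe_positions_alt (text : String) : List Int :=
  let runs := pvRuns text.toList 0
  ((PySem.List.enumerate text.toList 0).zip runs).filterMap
    (fun p => if p.1.2 = '|' ∧ p.2 % 2 = 0 then some p.1.1 else none)

-- ===== PRECONDITION & SPEC =====
def Spec_get_unescaped_pipe_positions (text : String) (out : List Int) : Prop := out = get_unescaped_pipe_positions_alt text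
instance (text : String) (out : List Int) : Decidable (Spec_get_unescaped_pipe_positions text out) := by unfold Spec_get_unescaped_pipe_positions; infer_instance

-- ===== CLAIM =====
def Claim_equal_get_unescaped_pipe_positions : Prop := ∀ (text : String), Dom_get_unescaped_pipe_positions text → Spec_get_unescaped_pipe_positions text (get_unescaped_pipe_positions text)

-- ===== LEMMAS AND PROOFS =====

-- pure-recursion reading of A's loop (positions-free accumulator)
def pvAGo : List Char → Int → Bool → List Int
  | [], _, _ => []
  | _ :: rest, i, true => pvAGo rest (i + 1) false
  | c :: rest, i, false =>
    if c = '\\' then pvAGo rest (i + 1) true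
    else if c = '|' then i :: pvAGo rest (i + 1) false
    else pvAGo rest (i + 1) false

-- fused reading of B's two passes
def pvBGo : List Char → Int → Nat → List Int
  | [], _, _ => []
  | c :: rest, i, run =>
    if c = '|' ∧ run % 2 = 0 then i :: pvBGo rest (i + 1) (if c = '\\' then run + 1 else 0)
    else pvBGo rest (i + 1) (if c = '\\' then run + 1 else 0)

-- A's foldl with any starting accumulator computes acc ++ pvAGo
theorem pvA_foldl_eq (l : List Char) : ∀ (i : Int) (acc : List Int) (esc : Bool),
    ((PySem.List.enumerate l i).foldl pvAStep (acc, esc)).1 = acc ++ pvAGo l i esc := by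
  induction l with
  | nil => intro i acc esc; simp [PySem.List.enumerate_nil, pvAGo]
  | cons c rest ih =>
    intro i acc esc
    rw [PySem.List.enumerate_cons]
    cases esc with
    | true => simp [pvAStep, pvAGo, ih]
    | false =>
      by_cases hb : c = '\\'
      · simp [pvAStep, pvAGo, hb, ih]
      · by_cases hp : c = '|'
        · simp [pvAStep, pvAGo, hp, ih]
        · simp [pvAStep, pvAGo, hb, hp, ih]

-- B's zip-filter over the runs array equals the fused recursion
theorem pvB_zip_eq (l : List Char) : ∀ (i : Int) (run : Nat),
    ((PySem.List.enumerate l i).zip (pvRuns l run)).filterMap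
      (fun p => if p.1.2 = '|' ∧ p.2 % 2 = 0 then some p.1.1 else none)
    = pvBGo l i run := by
  induction l with
  | nil => intro i run; simp [PySem.List.enumerate_nil, pvRuns, pvBGo]
  | cons c rest ih =>
    intro i run
    rw [PySem.List.enumerate_cons]
    by_cases h : c = '|' ∧ run % 2 = 0
    · simp [pvRuns, pvBGo, h, ih]
    · simp [pvRuns, pvBGo, h, ih]

-- the escape flag is exactly the parity of the backslash run
theorem pvAGo_eq_pvBGo : ∀ (l : List Char) (i : Int) (esc : Bool) (run : Nat),
    run % 2 = (if esc then 1 else 0) → pvAGo l i esc = pvBGo l i run := by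
  intro l
  induction l with
  | nil => intro i esc run _; simp [pvAGo, pvBGo]
  | cons c rest ih =>
    intro i esc run hpar
    cases esc with
    | true =>
      have h1 : run % 2 = 1 := by simpa using hpar
      rw [show pvAGo (c :: rest) i true = pvAGo rest (i + 1) false from rfl]
      rw [show pvBGo (c :: rest) i run
            = if c = '|' ∧ run % 2 = 0 then
                i :: pvBGo rest (i + 1) (if c = '\\' then run + 1 else 0)
              else pvBGo rest (i + 1) (if c = '\\' then run + 1 else 0) from rfl]
      rw [if_neg (by rintro ⟨_, h0⟩; omega)]
      refine ih (i + 1) false _ ?_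
      have hnext : (if c = '\\' then run + 1 else 0) % 2 = 0 := by split_ifs <;> omega
      simpa using hnext
    | false =>
      have h0 : run % 2 = 0 := by simpa using hpar
      by_cases hb : c = '\\'
      · subst hb
        rw [show pvAGo ('\\' :: rest) i false = pvAGo rest (i + 1) true from by
              simp [pvAGo]]
        rw [show pvBGo ('\\' :: rest) i run = pvBGo rest (i + 1) (run + 1) from by
              simp [pvBGo]]
        exact ih (i + 1) true (run + 1) (by simp; omega)
      · by_cases hp : c = '|'
        · subst hp
          rw [show pvAGo ('|' :: rest) i false = i :: pvAGo rest (i + 1) false from by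
                simp [pvAGo]]
          rw [show pvBGo ('|' :: rest) i run = i :: pvBGo rest (i + 1) 0 from by
                simp [pvBGo, h0]]
          rw [ih (i + 1) false 0 (by simp)]
        · rw [show pvAGo (c :: rest) i false = pvAGo rest (i + 1) false from by
                simp [pvAGo, hb, hp]]
          rw [show pvBGo (c :: rest) i run = pvBGo rest (i + 1) 0 from by
                simp [pvBGo, hb, hp]]
          exact ih (i + 1) false 0 (by simp)

-- ===== VERDICT =====
theorem get_unescaped_pipe_positions_spec : Claim_equal_get_unescaped_pipe_positions := by
  intro text _
  show get_unescaped_pipe_positions text = get_unescaped_pipe_positions_alt text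
  unfold get_unescaped_pipe_positions get_unescaped_pipe_positions_alt
  rw [pvA_foldl_eq, pvB_zip_eq, pvAGo_eq_pvBGo _ _ false 0 (by simp)]
  simp
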